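-- pv_equiv track=rewrite | github.com/lawrencecraft/AdventOfCode2019 | day24.py | calculateBiodiversity
-- ===== SOURCE A (Python) =====
-- def calculateBiodiversity(state):
--     offset = 0
--     biodiversity = 0
--     for row in state:
--         for c in row:
--             if c == '#':
--                 biodiversity |= 1 << offset
--             offset += 1
--     return biodiversity
-- ===== SOURCE B (Python) =====
-- def calculateBiodiversity(state):
--     bits = ''.join('1' if c == '#' else '0' for row in state for c in row)
--     return int('0' + bits[::-1], 2)
-- ===== Notes on version B (the rewrite author's own statement) =====
-- stated objective: idiomatic
-- what changed: B builds a '0'/'1' bit string from the flattened grid, reverses it so the first cell is the least-significant bit, and converts once with int(...,2), instead of threading a running integer through per-cell bit-OR/shift.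
import Mathlib
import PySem

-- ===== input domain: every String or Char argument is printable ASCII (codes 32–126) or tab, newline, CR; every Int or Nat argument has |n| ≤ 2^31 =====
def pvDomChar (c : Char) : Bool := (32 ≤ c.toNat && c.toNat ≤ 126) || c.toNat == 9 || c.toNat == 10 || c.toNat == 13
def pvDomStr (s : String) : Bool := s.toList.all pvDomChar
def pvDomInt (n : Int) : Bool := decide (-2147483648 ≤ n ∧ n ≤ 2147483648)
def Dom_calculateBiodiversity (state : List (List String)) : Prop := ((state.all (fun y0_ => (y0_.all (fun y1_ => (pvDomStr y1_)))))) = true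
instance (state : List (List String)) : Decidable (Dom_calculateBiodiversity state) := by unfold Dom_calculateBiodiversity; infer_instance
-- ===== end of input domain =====

-- B builds a '0'/'1' bit string from the flattened grid, reverses it, and converts once
-- (ported Horner-style, exact for the sign-free '0'/'1' strings Source B builds), instead of
-- threading a running integer through per-cell OR/shift; objective: more idiomatic.

-- ===== PORT A =====
-- biodiversity and offset are Python non-negative ints here (offset counts up from 0,
-- biodiversity only ORs in bits), so the running pair is kept in Nat and cast at the end.
def calculateBiodiversity (state : List (List String)) : Int :=
  ((state.foldl (fun (acc : Nat × Nat) row =>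
      row.foldl (fun (acc : Nat × Nat) c =>
        ((if c == "#" then acc.1 ||| (1 <<< acc.2) else acc.1), acc.2 + 1)) acc)
    (0, 0)).1 : Nat)

-- ===== PORT B =====
def calculateBiodiversity_alt (state : List (List String)) : Int :=
  -- bits = ''.join('1' if c == '#' else '0' for row in state for c in row)
  let bits : List Char := (state.flatMap (fun row => row)).map (fun c => if c == "#" then '1' else '0')
  -- int('0' + bits[::-1], 2), ported by hand as the base-2 Horner evaluation
  -- (exact: the string is '0' followed by '0'/'1' digits only, no sign/whitespace)
  ('0' :: bits.reverse).foldl (fun (acc : Int) c => 2 * acc + (if c == '1' then 1 else 0)) 0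

-- ===== PRECONDITION & SPEC =====
def Spec_calculateBiodiversity (state : List (List String)) (out : Int) : Prop := out = calculateBiodiversity_alt state
instance (state : List (List String)) (out : Int) : Decidable (Spec_calculateBiodiversity state out) := by unfold Spec_calculateBiodiversity; infer_instance

-- ===== CLAIM (what is proved, stated in full; the proofs are below) =====
def Claim_equal_calculateBiodiversity : Prop := ∀ (state : List (List String)), Dom_calculateBiodiversity state → Spec_calculateBiodiversity state (calculateBiodiversity state)

-- ===== LEMMAS AND PROOFS =====

-- value of a cell list, little-endian: first cell is bit 0
def pvVal : List String → Nat
  | [] => 0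
  | c :: t => (if c == "#" then 1 else 0) + 2 * pvVal t

theorem pv_lor_pow_eq_add (k n : ℕ) (h : n < 2^k) : n ||| 2^k = n + 2^k := by
  apply Nat.eq_of_testBit_eq
  intro i
  rw [Nat.testBit_lor, Nat.add_comm n (2^k)]
  rcases lt_trichotomy i k with hik | rfl | hik
  · rw [Nat.testBit_two_pow_of_ne (by omega), Nat.testBit_two_pow_add_gt hik]
    simp
  · rw [Nat.testBit_two_pow_self, Nat.testBit_lt_two_pow h, Nat.testBit_two_pow_add_eq,
      Nat.testBit_lt_two_pow h]
    simp
  · rw [Nat.testBit_two_pow_of_ne (by omega),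
      Nat.testBit_lt_two_pow (show n < 2^i from lt_of_lt_of_le h (Nat.pow_le_pow_right (by norm_num) (by omega))),
      Nat.testBit_lt_two_pow (show 2^k + n < 2^i from by
        have h1 : 2^(k+1) ≤ 2^i := Nat.pow_le_pow_right (by norm_num) (by omega)
        have h2 : 2^(k+1) = 2^k + 2^k := by ring
        omega)]
    simp

-- A's inner step, folded over a flat cell list, computes b + 2^k * pvVal
theorem pvA_fold (cells : List String) :
    ∀ (b k : Nat), b < 2^k →
      (cells.foldl (fun (acc : Nat × Nat) c =>
        ((if c == "#" then acc.1 ||| (1 <<< acc.2) else acc.1), acc.2 + 1)) (b, k)).1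
      = b + 2^k * pvVal cells := by
  induction cells with
  | nil => intro b k _; simp [pvVal]
  | cons c t ih =>
    intro b k hb
    by_cases hc : c == "#"
    · have hsh : (1 : Nat) <<< k = 2^k := Nat.one_shiftLeft k
      have hlt : b ||| 2^k < 2^(k+1) := by
        rw [pv_lor_pow_eq_add k b hb]
        have : 2^(k+1) = 2^k + 2^k := by ring
        omega
      simp only [List.foldl, hc, if_pos, hsh]
      rw [ih (b ||| 2^k) (k+1) hlt, pv_lor_pow_eq_add k b hb, pvVal]
      simp [hc]
      ring
    · have hlt : b < 2^(k+1) := lt_of_lt_of_le hb (Nat.pow_le_pow_right (by norm_num) (by omega))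
      simp only [List.foldl, hc, if_neg, Bool.false_eq_true, not_false_iff]
      rw [ih b (k+1) hlt, pvVal]
      simp [hc]
      ring

-- A's nested fold over rows equals the same fold over the flattened cell list
theorem pvA_flatten (state : List (List String)) (p : Nat × Nat) :
    state.foldl (fun (acc : Nat × Nat) row =>
        row.foldl (fun (acc : Nat × Nat) c =>
          ((if c == "#" then acc.1 ||| (1 <<< acc.2) else acc.1), acc.2 + 1)) acc) p
    = (state.flatMap (fun row => row)).foldl (fun (acc : Nat × Nat) c =>
          ((if c == "#" then acc.1 ||| (1 <<< acc.2) else acc.1), acc.2 + 1)) p := by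
  induction state generalizing p with
  | nil => simp
  | cons r t ih =>
    simp only [List.foldl_cons, List.flatMap_cons, List.foldl_append]
    exact ih _

-- B's Horner fold over the reversed bit string computes a * 2^len + pvVal
theorem pvB_fold (cells : List String) :
    ∀ (a : Int),
      ((cells.map (fun c => if c == "#" then '1' else '0')).reverse.foldl
        (fun (acc : Int) c => 2 * acc + (if c == '1' then 1 else 0)) a)
      = a * 2^cells.length + (pvVal cells : Int) := by
  induction cells with
  | nil => intro a; simp [pvVal]
  | cons c t ih =>
    intro a
    simp only [List.map, List.reverse_cons, List.foldl_append, List.foldl_cons, List.foldl_nil,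
      List.length_cons, pvVal]
    rw [ih a]
    by_cases hc : c == "#" <;> simp [hc] <;> ring

theorem pv_main (state : List (List String)) :
    calculateBiodiversity state = calculateBiodiversity_alt state := by
  unfold calculateBiodiversity calculateBiodiversity_alt
  rw [pvA_flatten]
  rw [pvA_fold (state.flatMap (fun row => row)) 0 0 (by norm_num)]
  simp only [List.foldl_cons]
  rw [show (2 * (0:Int) + (if (('0':Char) == '1') = true then 1 else 0)) = 0 from by decide]
  rw [pvB_fold (state.flatMap (fun row => row)) 0]
  push_cast
  ring

-- ===== VERDICT (by name: the statement is the Claim_ definition above) =====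
theorem calculateBiodiversity_spec : Claim_equal_calculateBiodiversity := by
  intro state _
  unfold Spec_calculateBiodiversity
  exact pv_main state
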